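-- pv_equiv track=rewrite | github.com/luceinaltis/Algorithm-study | HackerRank_Bear_And_Steady_Gene.py | steadyGene
-- ===== SOURCE A (Python) =====
-- def balanced(l, dic):
--     ans = True
--     for i in dic:
--         if dic[i] > l:
--             ans = False
--             break
--     return ans
--
-- def steadyGene(gene):
--     dic = {'C': 0, 'G': 0, 'A': 0, 'T': 0}
--
--     l = len(gene)//4
--     for ch in gene:
--         dic[ch] += 1
--
--     left = 0
--     right = 0
--     minLen = len(gene)
--     while left < len(gene) and right < len(gene):
--         if not balanced(l, dic):
--             dic[gene[right]] -= 1
--             right += 1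
--         else:
--             minLen = min(minLen, right - left)
--             dic[gene[left]] += 1
--             left += 1
--
--     return minLen
-- ===== SOURCE B (Python) =====
-- def steadyGene(gene):
--     n = len(gene)
--     limit = n // 4
--     total = {'C': 0, 'G': 0, 'A': 0, 'T': 0}
--     for ch in gene:
--         total[ch] += 1
--
--     def feasible(d):
--         # is there a window of length d whose removal leaves every count <= limit?
--         win = {'C': 0, 'G': 0, 'A': 0, 'T': 0}
--         for ch in gene[:d]:
--             win[ch] += 1
--         l = 0
--         while True:
--             if all(total[c] - win[c] <= limit for c in 'CGAT'):
--                 return True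
--             if l + d >= n:
--                 return False
--             win[gene[l + d]] += 1
--             win[gene[l]] -= 1
--             l += 1
--
--     lo, hi = 0, n
--     while lo < hi:
--         mid = (lo + hi) // 2
--         if feasible(mid):
--             hi = mid
--         else:
--             lo = mid + 1
--     return lo
-- ===== Notes on version B (the rewrite author's own statement) =====
-- stated objective: alternative
-- what changed: Replaces A's grow/shrink two-pointer sweep over outside-counts with binary search on the answer length, each candidate length checked by a rolling fixed-width window scan.
-- intended difference: On genes whose only shortest feasible replacement windows end at the last character, A's loop exits once right reaches the end without shrinking left, so A returns the length of the best window avoiding the last position (e.g. steadyGene('AGAA')=3) while B returns the true minimum (2), which is the intended answer to the HackerRank problem. — e.g. on steadyGene("AGAA"): A returns 3, B returns 2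
import Mathlib
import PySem

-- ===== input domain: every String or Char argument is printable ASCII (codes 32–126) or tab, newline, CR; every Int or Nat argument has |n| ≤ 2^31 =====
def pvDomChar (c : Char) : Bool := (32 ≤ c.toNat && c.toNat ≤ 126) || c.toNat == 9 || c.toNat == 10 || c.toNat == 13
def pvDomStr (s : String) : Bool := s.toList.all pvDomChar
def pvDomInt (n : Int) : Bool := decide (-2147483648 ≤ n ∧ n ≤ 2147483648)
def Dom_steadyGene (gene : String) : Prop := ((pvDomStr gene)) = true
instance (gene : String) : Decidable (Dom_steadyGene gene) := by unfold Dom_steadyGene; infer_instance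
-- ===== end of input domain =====

-- B replaces A's grow/shrink two-pointer sweep with binary search on the answer length plus a
-- rolling fixed-width window check (objective: alternative); A misses feasible windows ending at
-- the last character (see D_steadyGene), where B returns the intended minimum.

-- ===== PORT A =====
-- 'for i in dic: if dic[i] > l: ans = False; break' — iterate the keys, look each up
def pvBalancedGo (l : Int) (dic : PySem.Dict Char Int) : List Char → Bool
  | [] => true
  | k :: ks => if dic.getD k 0 > l then false else pvBalancedGo l dic ks

def pvBalanced (l : Int) (dic : PySem.Dict Char Int) : Bool :=
  pvBalancedGo l dic dic.keys

-- the 'while left < len(gene) and right < len(gene)' loop, structural on a fuel that bounds the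
-- iteration count (each step increases left + right by 1); dict updates totalized with getD
-- (Python's dic[ch] -= 1 / += 1 raises KeyError only outside Pre_steadyGene)
def pvALoop (gs : List Char) (n l : Int) : Nat → PySem.Dict Char Int → Int → Int → Int → Int
  | 0, _, _, _, minLen => minLen
  | fuel + 1, dic, left, right, minLen =>
    if left < n ∧ right < n then
      if !(pvBalanced l dic) then
        let c := PySem.List.pyGetD gs right 'C'
        pvALoop gs n l fuel (dic.insert c (dic.getD c 0 - 1)) left (right + 1) minLen
      else
        let c := PySem.List.pyGetD gs left 'C'
        pvALoop gs n l fuel (dic.insert c (dic.getD c 0 + 1)) (left + 1) right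
          (min minLen (right - left))
    else
      minLen

def steadyGene (gene : String) : Int :=
  let gs := gene.toList
  let dic0 : PySem.Dict Char Int := PySem.Dict.ofList [('C', 0), ('G', 0), ('A', 0), ('T', 0)]
  let l := PySem.Int.floordiv (gs.length : Int) 4
  let dic := gs.foldl (fun d ch => d.insert ch (d.getD ch 0 + 1)) dic0
  pvALoop gs (gs.length : Int) l (2 * gs.length + 1) dic 0 0 (gs.length : Int)

-- ===== PORT B =====
-- 'while True' of feasible(d): check the window [l, l+d), then slide it one step right;
-- structural on a fuel bounding the number of slides
def pvFeasLoop (gs : List Char) (n limit : Int) (total : PySem.Dict Char Int) (d : Int) :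
    Nat → PySem.Dict Char Int → Int → Bool
  | 0, _, _ => false
  | fuel + 1, win, l =>
    if (['C', 'G', 'A', 'T'] : List Char).all
        (fun c => total.getD c 0 - win.getD c 0 ≤ limit) then
      true
    else if l + d ≥ n then
      false
    else
      let c1 := PySem.List.pyGetD gs (l + d) 'C'
      let win1 := win.insert c1 (win.getD c1 0 + 1)
      let c2 := PySem.List.pyGetD gs l 'C'
      pvFeasLoop gs n limit total d fuel (win1.insert c2 (win1.getD c2 0 - 1)) (l + 1)

def pvFeasible (gs : List Char) (n limit : Int) (total : PySem.Dict Char Int) (d : Int) : Bool :=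
  let win0 : PySem.Dict Char Int := PySem.Dict.ofList [('C', 0), ('G', 0), ('A', 0), ('T', 0)]
  let win := (PySem.List.slice gs none (some d)).foldl
    (fun w ch => w.insert ch (w.getD ch 0 + 1)) win0
  pvFeasLoop gs n limit total d ((n - d).toNat + 1) win 0

-- 'while lo < hi' binary search on the answer length, structural on a fuel bounding the iterations
def pvBSearch (gs : List Char) (n limit : Int) (total : PySem.Dict Char Int) :
    Nat → Int → Int → Int
  | 0, lo, _ => lo
  | fuel + 1, lo, hi =>
    if lo < hi then
      let mid := PySem.Int.floordiv (lo + hi) 2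
      if pvFeasible gs n limit total mid then
        pvBSearch gs n limit total fuel lo mid
      else
        pvBSearch gs n limit total fuel (mid + 1) hi
    else
      lo

def steadyGene_alt (gene : String) : Int :=
  let gs := gene.toList
  let n : Int := (gs.length : Int)
  let limit := PySem.Int.floordiv n 4
  let total0 : PySem.Dict Char Int := PySem.Dict.ofList [('C', 0), ('G', 0), ('A', 0), ('T', 0)]
  let total := gs.foldl (fun d ch => d.insert ch (d.getD ch 0 + 1)) total0
  pvBSearch gs n limit total ((n - 0).toNat + 1) 0 n

-- ===== PRECONDITION & SPEC =====
-- removing the window gene[l:r] leaves each of the four nucleotide counts ≤ len(gene)//4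
def pvFeasB (gs : List Char) (l r : Nat) : Bool :=
  "CGAT".toList.all fun c =>
    decide ((gs.count c : Int) - (((gs.drop l).take (r - l)).count c : Int) ≤ ((gs.length / 4 : Nat) : Int))

-- A raises KeyError on any character other than the four nucleotide letters
def Pre_steadyGene (gene : String) : Prop :=
  gene.toList.all (fun c => c == 'C' || c == 'G' || c == 'A' || c == 'T') = true
instance (gene : String) : Decidable (Pre_steadyGene gene) := by
  unfold Pre_steadyGene; infer_instance
def pvWitness_steadyGene : String := "GAAA"

-- On genes whose only shortest feasible replacement windows end at the last character, A's loop
-- exits once right reaches the end without shrinking left, so A returns the length of the best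
-- window avoiding the last position while B returns the true minimum, the intended answer.
def D_steadyGene (gene : String) : Prop :=
  (List.range (gene.toList.length + 1)).any (fun l =>
    decide (0 < l) && pvFeasB gene.toList l gene.toList.length &&
    (List.range gene.toList.length).all (fun l' =>
      (List.range gene.toList.length).all (fun r' =>
        !(decide (l' ≤ r')) || !(pvFeasB gene.toList l' r') ||
          decide (gene.toList.length - l < r' - l')))) = true
instance (gene : String) : Decidable (D_steadyGene gene) := by
  unfold D_steadyGene; infer_instance

def Spec_steadyGene (gene : String) (out : Int) : Prop :=
  ¬ D_steadyGene gene → out = steadyGene_alt gene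
instance (gene : String) (out : Int) : Decidable (Spec_steadyGene gene out) := by
  unfold Spec_steadyGene; infer_instance

def pvDiffWitness_steadyGene : String := "AGAA"
def pvDiffWitnessOut_steadyGene : Int × Int := (3, 2)

-- ===== CLAIM =====
def Claim_unchanged_steadyGene : Prop :=
  ∀ (gene : String), Dom_steadyGene gene → Pre_steadyGene gene →
    Spec_steadyGene gene (steadyGene gene)
def Claim_changed_steadyGene : Prop :=
  Dom_steadyGene (pvDiffWitness_steadyGene) ∧ Pre_steadyGene (pvDiffWitness_steadyGene) ∧
    D_steadyGene (pvDiffWitness_steadyGene) ∧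
    steadyGene (pvDiffWitness_steadyGene) = pvDiffWitnessOut_steadyGene.1 ∧
    steadyGene_alt (pvDiffWitness_steadyGene) = pvDiffWitnessOut_steadyGene.2 ∧
    pvDiffWitnessOut_steadyGene.1 ≠ pvDiffWitnessOut_steadyGene.2
def Claim_exact_steadyGene : Prop :=
  ∀ (gene : String), Dom_steadyGene gene → Pre_steadyGene gene → D_steadyGene gene →
    steadyGene gene ≠ steadyGene_alt gene

-- ===== LEMMAS AND PROOFS =====

-- the four nucleotides, in A's dict-insertion order (proof-layer helper)
def pvCgat : List Char := ['C', 'G', 'A', 'T']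

def pvFeas (gs : List Char) (l r : Nat) : Prop := pvFeasB gs l r = true

-- the window gene[l:r]
def pvWindow (gs : List Char) (l r : Nat) : List Char := (gs.drop l).take (r - l)

-- prefix counts
def pvPC (gs : List Char) (i : Nat) (c : Char) : Int := ((gs.take i).count c : Int)

lemma pvPC_mono (gs : List Char) (c : Char) {i j : Nat} (h : i ≤ j) :
    pvPC gs i c ≤ pvPC gs j c := by
  unfold pvPC
  have hp : gs.take i = (gs.take j).take i := by rw [List.take_take, Nat.min_eq_left h]
  have : (gs.take i).Sublist (gs.take j) := by
    rw [hp]; exact (List.take_prefix i (gs.take j)).sublist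
  exact_mod_cast this.count_le c

lemma pvPC_succ (gs : List Char) (c : Char) {i : Nat} (h : i < gs.length) :
    pvPC gs (i + 1) c = pvPC gs i c + (if gs[i] = c then 1 else 0) := by
  unfold pvPC
  have hcount : (gs.take (i + 1)).count c = (gs.take i).count c + (if gs[i] = c then 1 else 0) := by
    rw [List.take_add_one, List.getElem?_eq_getElem h]
    simp only [Option.toList_some, List.count_append, List.count_singleton']
  rw [hcount]
  by_cases hc : gs[i] = c <;> simp [hc]

lemma pvWindow_count (gs : List Char) (c : Char) {l r : Nat} (h : l ≤ r) :
    ((pvWindow gs l r).count c : Int) = pvPC gs r c - pvPC gs l c := by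
  obtain ⟨m, rfl⟩ : ∃ m, r = l + m := ⟨r - l, by omega⟩
  unfold pvWindow pvPC
  rw [List.take_add, List.count_append]
  have : l + m - l = m := by omega
  rw [this]
  have htl : (gs.take l).count c ≤ (gs.take l ++ (gs.drop l).take m).count c := by
    rw [List.count_append]; omega
  push_cast
  omega

lemma pvFeas_iff (gs : List Char) (l r : Nat) :
    pvFeas gs l r ↔ ∀ c ∈ pvCgat,
      (gs.count c : Int) - ((pvWindow gs l r).count c : Int) ≤ ((gs.length / 4 : Nat) : Int) := by
  unfold pvFeas pvFeasB pvCgat pvWindow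
  have hlit : "CGAT".toList = ['C', 'G', 'A', 'T'] := rfl
  rw [hlit, List.all_eq_true]
  simp only [decide_eq_true_iff]

lemma pvFeas_mono (gs : List Char) {l' l r r' : Nat} (h1 : l' ≤ l) (h2 : l ≤ r) (h3 : r ≤ r')
    (hf : pvFeas gs l r) : pvFeas gs l' r' := by
  rw [pvFeas_iff] at hf ⊢
  intro c hc
  have hx := hf c hc
  rw [pvWindow_count gs c h2] at hx
  rw [pvWindow_count gs c (by omega : l' ≤ r')]
  have m1 := pvPC_mono gs c h1
  have m2 := pvPC_mono gs c h3
  omega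

lemma pvFeas_whole (gs : List Char) : pvFeas gs 0 gs.length := by
  rw [pvFeas_iff]
  intro c hc
  simp [pvWindow]
  positivity

lemma pvFeas_empty_iff (gs : List Char) (l : Nat) :
    pvFeas gs l l ↔ ∀ c ∈ pvCgat, (gs.count c : Int) ≤ ((gs.length / 4 : Nat) : Int) := by
  rw [pvFeas_iff]
  unfold pvWindow
  simp

-- A's search value: least d that is the current minLen m or the length of a feasible window
-- avoiding the last position, with both endpoints at or beyond (left, right)
def pvPA (gs : List Char) (m left right d : Nat) : Bool :=
  d == m || (List.range gs.length).any (fun l =>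
    decide (l + d < gs.length) && decide (left ≤ l) && decide (right ≤ l + d) &&
      pvFeasB gs l (l + d))

lemma pvPA_iff (gs : List Char) (m left right d : Nat) :
    pvPA gs m left right d = true ↔
      d = m ∨ ∃ l, l + d < gs.length ∧ left ≤ l ∧ right ≤ l + d ∧ pvFeas gs l (l + d) := by
  unfold pvPA pvFeas
  rw [Bool.or_eq_true, List.any_eq_true]
  simp only [List.mem_range, Bool.and_eq_true, decide_eq_true_iff, beq_iff_eq]
  constructor
  · rintro (h | ⟨l, _, ⟨⟨h2, h3⟩, h4⟩, h5⟩)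
    · exact Or.inl h
    · exact Or.inr ⟨l, h2, h3, h4, h5⟩
  · rintro (h | ⟨l, h2, h3, h4, h5⟩)
    · exact Or.inl h
    · exact Or.inr ⟨l, by omega, ⟨⟨h2, h3⟩, h4⟩, h5⟩

lemma pvPA_ex (gs : List Char) (m left right : Nat) : ∃ d, pvPA gs m left right d = true := by
  exact ⟨m, by simp [pvPA]⟩

def pvResA (gs : List Char) (m left right : Nat) : Nat := Nat.find (pvPA_ex gs m left right)

-- B's search value: least d for which some window of length d is feasible
def pvOKB (gs : List Char) (d : Nat) : Bool :=
  (List.range (gs.length + 1)).any (fun l => decide (l + d ≤ gs.length) && pvFeasB gs l (l + d))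

lemma pvOKB_iff (gs : List Char) (d : Nat) :
    pvOKB gs d = true ↔ ∃ l, l + d ≤ gs.length ∧ pvFeas gs l (l + d) := by
  unfold pvOKB pvFeas
  rw [List.any_eq_true]
  simp only [List.mem_range, Bool.and_eq_true, decide_eq_true_iff]
  constructor
  · rintro ⟨l, _, h2, h3⟩; exact ⟨l, h2, h3⟩
  · rintro ⟨l, h2, h3⟩; exact ⟨l, by omega, h2, h3⟩

lemma pvOKB_ex (gs : List Char) : ∃ d, pvOKB gs d = true := by
  refine ⟨gs.length, (pvOKB_iff gs gs.length).2 ⟨0, by omega, ?_⟩⟩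
  simpa using pvFeas_whole gs

def pvLeastB (gs : List Char) : Nat := Nat.find (pvOKB_ex gs)


-- window structure
lemma pvWindow_cons (gs : List Char) {l r : Nat} (h1 : l < r) (h2 : l < gs.length) :
    pvWindow gs l r = gs[l] :: pvWindow gs (l + 1) r := by
  unfold pvWindow
  rw [List.drop_eq_getElem_cons h2]
  have : r - l = (r - (l + 1)) + 1 := by omega
  rw [this, List.take_succ_cons]

lemma pvWindow_snoc (gs : List Char) {l r : Nat} (h1 : l ≤ r) (h2 : r < gs.length) :
    pvWindow gs l (r + 1) = pvWindow gs l r ++ [gs[r]] := by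
  unfold pvWindow
  have h3 : r + 1 - l = (r - l) + 1 := by omega
  have h4 : r - l < (gs.drop l).length := by simp; omega
  rw [h3, List.take_add_one, List.getElem?_eq_getElem h4]
  simp [List.getElem_drop]
  congr 1
  omega

-- the 4-key dict built by the counting loop
lemma pvBuild_keys (gs : List Char) (hpre : ∀ c ∈ gs, c ∈ pvCgat) :
    (gs.foldl (fun d ch => d.insert ch (d.getD ch 0 + 1))
      (PySem.Dict.ofList [('C', (0:Int)), ('G', 0), ('A', 0), ('T', 0)])).keys = pvCgat := by
  rw [PySem.Dict.keys_foldl_insert]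
  have hk : (PySem.Dict.ofList [('C', (0:Int)), ('G', 0), ('A', 0), ('T', 0)]).keys = pvCgat := by
    decide
  rw [hk, PySem.Set.update_eq_append_filter]
  have : (PySem.Set.ofList gs).filter (fun y => !(PySem.Set.contains pvCgat y)) = [] := by
    rw [List.filter_eq_nil_iff]
    intro y hy
    have h1 : y ∈ pvCgat := hpre y ((PySem.Set.mem_ofList gs y).1 hy)
    simpa using h1
  rw [this, List.append_nil]

lemma pvBuild_getD (gs : List Char) (c : Char) (hc : c ∈ pvCgat) :
    (gs.foldl (fun d ch => d.insert ch (d.getD ch 0 + 1))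
      (PySem.Dict.ofList [('C', (0:Int)), ('G', 0), ('A', 0), ('T', 0)])).getD c 0
      = (gs.count c : Int) := by
  rw [PySem.Dict.getD_foldl_insert_add_one]
  have : (PySem.Dict.ofList [('C', (0:Int)), ('G', 0), ('A', 0), ('T', 0)]).getD c 0 = 0 := by
    fin_cases hc <;> decide
  rw [this, zero_add]

-- balanced(l, dic) over a dict whose keys are the four nucleotide letters
lemma pvBalanced_iff (l : Int) (dic : PySem.Dict Char Int) (hkeys : dic.keys = pvCgat) :
    pvBalanced l dic = true ↔ ∀ c ∈ pvCgat, dic.getD c 0 ≤ l := by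
  unfold pvBalanced
  rw [hkeys]
  show pvBalancedGo l dic ['C', 'G', 'A', 'T'] = true ↔ _
  simp only [pvBalancedGo, pvCgat, List.forall_mem_cons]
  split_ifs <;> simp_all

-- one-sided Nat.find comparison
lemma pvFind_le_find {p q : Nat → Prop} [DecidablePred p] [DecidablePred q]
    (hp : ∃ d, p d) (hq : ∃ d, q d) (h : ∀ d, q d → p d) : Nat.find hp ≤ Nat.find hq :=
  Nat.find_le (h _ (Nat.find_spec hq))

lemma pvResA_stop (gs : List Char) (m left : Nat) : pvResA gs m left gs.length = m := by
  unfold pvResA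
  rw [Nat.find_eq_iff]
  constructor
  · simp [pvPA]
  · intro j hj
    rw [pvPA_iff]
    rintro (rfl | ⟨l, h1, _, h3, _⟩) <;> omega

lemma pvResA_unbal (gs : List Char) {left right m : Nat}
    (hlr : left ≤ right) (hnf : ¬ pvFeas gs left right) :
    pvResA gs m left right = pvResA gs m left (right + 1) := by
  unfold pvResA
  apply le_antisymm
  · apply pvFind_le_find
    intro d hd
    rw [pvPA_iff] at hd ⊢
    rcases hd with h | ⟨l, h1, h2, h3, h4⟩
    · exact Or.inl h
    · exact Or.inr ⟨l, h1, h2, by omega, h4⟩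
  · apply pvFind_le_find
    intro d hd
    rw [pvPA_iff] at hd ⊢
    rcases hd with h | ⟨l, h1, h2, h3, h4⟩
    · exact Or.inl h
    · refine Or.inr ⟨l, h1, h2, ?_, h4⟩
      rcases Nat.lt_or_ge right (l + d) with h5 | h5
      · omega
      · exfalso
        have he : l + d = right := by omega
        rw [he] at h4
        exact hnf (pvFeas_mono gs h2 (by omega) (le_refl right) h4)

lemma pvResA_bal (gs : List Char) {left right m : Nat}
    (hf : pvFeas gs left right) (hlt : left < right) (hrn : right < gs.length) :
    pvResA gs m left right = pvResA gs (min m (right - left)) (left + 1) right := by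
  have hfr : pvFeas gs left (left + (right - left)) := by
    have : left + (right - left) = right := by omega
    rw [this]; exact hf
  apply le_antisymm
  · apply pvFind_le_find
    intro d hd
    rw [pvPA_iff] at hd ⊢
    rcases hd with h | ⟨l, h1, h2, h3, h4⟩
    · by_cases hm : m ≤ right - left
      · exact Or.inl (by omega)
      · refine Or.inr ⟨left, by omega, le_refl left, by omega, ?_⟩
        have hld : left + d = right := by omega
        rw [hld]; exact hf
    · exact Or.inr ⟨l, h1, by omega, h3, h4⟩
  · -- find at (left+1) ≤ find at left
    have hspec := Nat.find_spec (pvPA_ex gs m left right)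
    rw [pvPA_iff] at hspec
    rcases hspec with h | ⟨l, h1, h2, h3, h4⟩
    · calc Nat.find (pvPA_ex gs (min m (right - left)) (left + 1) right)
          ≤ min m (right - left) := Nat.find_le (by rw [pvPA_iff]; exact Or.inl rfl)
        _ ≤ m := by omega
        _ = _ := h.symm
    · rcases Nat.eq_or_lt_of_le h2 with he | hlt2
      · -- l = left: the found length is ≥ right - left
        calc Nat.find (pvPA_ex gs (min m (right - left)) (left + 1) right)
            ≤ min m (right - left) := Nat.find_le (by rw [pvPA_iff]; exact Or.inl rfl)
          _ ≤ Nat.find (pvPA_ex gs m left right) := by omega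
      · exact Nat.find_le (by rw [pvPA_iff]; exact Or.inr ⟨l, h1, by omega, h3, h4⟩)


-- characterisation of A's while-loop
lemma pvALoop_main (gs : List Char) (hpre : ∀ c ∈ gs, c ∈ pvCgat) (hne : ¬ pvFeas gs 0 0) :
    ∀ (fuel : Nat) (left right m : Nat) (dic : PySem.Dict Char Int),
      left ≤ right → right ≤ gs.length →
      gs.length - left + (gs.length - right) ≤ fuel →
      dic.keys = pvCgat →
      (∀ c ∈ pvCgat, dic.getD c 0
          = (gs.count c : Int) - ((pvWindow gs left right).count c : Int)) →
      (∀ l r, left ≤ l → l ≤ r → r < right → ¬ pvFeas gs l r) →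
      pvALoop gs (gs.length : Int) ((gs.length / 4 : Nat) : Int) fuel dic left right m
        = (pvResA gs m left right : Int) := by
  intro fuel
  induction fuel with
  | zero =>
    intro left right m dic h1 h2 h3 hk hd hnf
    have hr : right = gs.length := by omega
    simp only [pvALoop]
    rw [hr, pvResA_stop]
  | succ fuel ih =>
    intro left right m dic h1 h2 h3 hk hd hnf
    by_cases hrn : right < gs.length
    · have hln : left < gs.length := by omega
      have hcond : ((left : Int) < (gs.length : Int) ∧ (right : Int) < (gs.length : Int)) :=
        ⟨by exact_mod_cast hln, by exact_mod_cast hrn⟩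
      have hbal : (pvBalanced ((gs.length / 4 : Nat) : Int) dic = true) ↔ pvFeas gs left right := by
        rw [pvBalanced_iff _ _ hk, pvFeas_iff]
        constructor
        · intro h c hc
          have hx := h c hc
          rw [hd c hc] at hx
          exact hx
        · intro h c hc
          rw [hd c hc]
          exact h c hc
      simp only [pvALoop, if_pos hcond]
      by_cases hf : pvFeas gs left right
      · -- balanced: record minLen, shrink from the left
        have hb : pvBalanced ((gs.length / 4 : Nat) : Int) dic = true := hbal.2 hf
        have hlr2 : left < right := by
          rcases Nat.eq_or_lt_of_le h1 with he | h
          · exact absurd ((pvFeas_empty_iff gs 0).2 ((pvFeas_empty_iff gs left).1 (he ▸ hf))) hne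
          · exact h
        rw [hb]
        simp only [Bool.not_true, Bool.false_eq_true, if_false]
        have hcget : PySem.List.pyGetD gs (left : Int) 'C' = gs[left] := by
          rw [PySem.List.pyGetD_natCast]
          exact List.getD_eq_getElem gs 'C' hln
        have hmem : gs[left] ∈ pvCgat := hpre _ (List.getElem_mem hln)
        have hcont : dic.contains gs[left] = true :=
          (PySem.Dict.contains_iff_mem_keys dic gs[left]).2 (hk ▸ hmem)
        rw [hcget]
        have e1 : (left : Int) + 1 = ((left + 1 : Nat) : Int) := by push_cast; ring
        have e2 : min (m : Int) ((right : Int) - (left : Int))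
            = ((min m (right - left) : Nat) : Int) := by
          rw [Nat.cast_min, Nat.cast_sub h1]
        rw [e1, e2, pvResA_bal gs hf hlr2 hrn]
        apply ih
        · omega
        · exact h2
        · omega
        · rw [PySem.Dict.keys_insert_of_contains dic _ hcont]; exact hk
        · intro c hc
          rw [PySem.Dict.getD_insert]
          have hw : ((pvWindow gs left right).count c : Int)
              = ((pvWindow gs (left + 1) right).count c : Int)
                + (if gs[left] = c then 1 else 0) := by
            rw [pvWindow_cons gs hlr2 hln, List.count_cons]
            by_cases hcc : gs[left] = c <;> simp [hcc]
          by_cases hcc : c = gs[left]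
          · subst hcc
            rw [if_pos rfl, hd _ hmem, hw, if_pos rfl]
            ring
          · rw [if_neg hcc, hd c hc, hw, if_neg (fun h => hcc h.symm)]
            ring
        · intro l r ha hb' hc'
          exact hnf l r (by omega) hb' hc'
      · -- unbalanced: grow to the right
        have hb : pvBalanced ((gs.length / 4 : Nat) : Int) dic = false := by
          cases hb' : pvBalanced ((gs.length / 4 : Nat) : Int) dic
          · rfl
          · exact absurd (hbal.1 hb') hf
        rw [hb]
        simp only [Bool.not_false, if_true]
        have hcget : PySem.List.pyGetD gs (right : Int) 'C' = gs[right] := by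
          rw [PySem.List.pyGetD_natCast]
          exact List.getD_eq_getElem gs 'C' hrn
        have hmem : gs[right] ∈ pvCgat := hpre _ (List.getElem_mem hrn)
        have hcont : dic.contains gs[right] = true :=
          (PySem.Dict.contains_iff_mem_keys dic gs[right]).2 (hk ▸ hmem)
        rw [hcget]
        have e1 : (right : Int) + 1 = ((right + 1 : Nat) : Int) := by push_cast; ring
        rw [e1, pvResA_unbal gs h1 hf]
        apply ih
        · omega
        · omega
        · omega
        · rw [PySem.Dict.keys_insert_of_contains dic _ hcont]; exact hk
        · intro c hc
          rw [PySem.Dict.getD_insert]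
          have hw : ((pvWindow gs left (right + 1)).count c : Int)
              = ((pvWindow gs left right).count c : Int)
                + (if gs[right] = c then 1 else 0) := by
            rw [pvWindow_snoc gs h1 hrn, List.count_append, List.count_singleton']
            by_cases hcc : gs[right] = c <;> simp [hcc]
          by_cases hcc : c = gs[right]
          · subst hcc
            rw [if_pos rfl, hd _ hmem, hw, if_pos rfl]
            ring
          · rw [if_neg hcc, hd c hc, hw, if_neg (fun h => hcc h.symm)]
            ring
        · intro l r ha hb' hc'
          rcases Nat.lt_or_ge r right with h5 | h5
          · exact hnf l r ha hb' h5
          · have hrr : r = right := by omega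
            subst hrr
            intro hfe
            exact hf (pvFeas_mono gs ha hb' (le_refl r) hfe)
    · have hr : right = gs.length := by omega
      have hcond : ¬ ((left : Int) < (gs.length : Int) ∧ (right : Int) < (gs.length : Int)) := by
        rintro ⟨-, hx⟩
        rw [hr] at hx
        exact absurd hx (by omega)
      simp only [pvALoop, if_neg hcond]
      rw [hr, pvResA_stop]

-- the four counts add up to the length
lemma pvSum_counts (gs : List Char) (hpre : ∀ c ∈ gs, c ∈ pvCgat) :
    gs.count 'C' + gs.count 'G' + gs.count 'A' + gs.count 'T' = gs.length := by
  induction gs with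
  | nil => simp
  | cons x t ihs =>
    have hx : x ∈ pvCgat := hpre x List.mem_cons_self
    have ht := ihs (fun c hc => hpre c (List.mem_cons_of_mem x hc))
    fin_cases hx <;> simp [List.count_cons] <;> omega

-- if every count is at most len//4 then each count of an occurring char equals len//4
lemma pvTot_eq_L (gs : List Char) (hpre : ∀ c ∈ gs, c ∈ pvCgat)
    (hall : ∀ c ∈ pvCgat, (gs.count c : Int) ≤ ((gs.length / 4 : Nat) : Int))
    (c : Char) (hc : c ∈ gs) : (gs.count c : Int) = ((gs.length / 4 : Nat) : Int) := by
  have hsum := pvSum_counts gs hpre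
  have h4 : gs.length / 4 * 4 ≤ gs.length := Nat.div_mul_le_self gs.length 4
  have h1 := hall 'C' (by decide)
  have h2 := hall 'G' (by decide)
  have h3 := hall 'A' (by decide)
  have h5 := hall 'T' (by decide)
  have hcc : c ∈ pvCgat := hpre c hc
  fin_cases hcc <;> omega


-- the already-balanced gene: after the first record of 0 the loop alternates and keeps minLen = 0
lemma pvOsc (gs : List Char) (hpre : ∀ c ∈ gs, c ∈ pvCgat)
    (hall : ∀ c ∈ pvCgat, (gs.count c : Int) ≤ ((gs.length / 4 : Nat) : Int)) :
    ∀ (fuel : Nat), ∀ (i : Nat) (hi : i < gs.length) (dic : PySem.Dict Char Int),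
      2 * (gs.length - i) ≤ fuel →
      dic.keys = pvCgat →
      (∀ c ∈ pvCgat, dic.getD c 0 = (gs.count c : Int) + (if gs[i] = c then 1 else 0)) →
      pvALoop gs (gs.length : Int) ((gs.length / 4 : Nat) : Int) fuel dic ((i : Int) + 1) (i : Int) 0
        = 0 := by
  intro fuel
  induction fuel using Nat.strong_induction_on with
  | _ fuel ih =>
    intro i hi dic hfu hk hd
    obtain ⟨f1, rfl⟩ : ∃ f1, fuel = f1 + 1 := ⟨fuel - 1, by omega⟩
    by_cases hin : i + 1 < gs.length
    · have hcond : ((i : Int) + 1 < (gs.length : Int) ∧ (i : Int) < (gs.length : Int)) := by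
        constructor <;> [exact_mod_cast hin; exact_mod_cast hi]
      have hmem : gs[i] ∈ pvCgat := hpre _ (List.getElem_mem hi)
      have htot : (gs.count gs[i] : Int) = ((gs.length / 4 : Nat) : Int) :=
        pvTot_eq_L gs hpre hall gs[i] (List.getElem_mem hi)
      -- first step: unbalanced (the extra copy of gs[i] pushes it over the limit)
      have hb : pvBalanced ((gs.length / 4 : Nat) : Int) dic = false := by
        cases hb' : pvBalanced ((gs.length / 4 : Nat) : Int) dic
        · rfl
        · exfalso
          have hx := (pvBalanced_iff _ dic hk).1 hb' gs[i] hmem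
          rw [hd gs[i] hmem, if_pos rfl, htot] at hx
          omega
      simp only [pvALoop, if_pos hcond, hb, Bool.not_false, if_true]
      have hcget : PySem.List.pyGetD gs (i : Int) 'C' = gs[i] := by
        rw [PySem.List.pyGetD_natCast]
        exact List.getD_eq_getElem gs 'C' hi
      rw [hcget]
      have hcont : dic.contains gs[i] = true :=
        (PySem.Dict.contains_iff_mem_keys dic gs[i]).2 (hk ▸ hmem)
      set dic2 := dic.insert gs[i] (dic.getD gs[i] 0 - 1) with hdic2
      have hk2 : dic2.keys = pvCgat := by
        rw [hdic2, PySem.Dict.keys_insert_of_contains dic _ hcont]; exact hk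
      have hd2 : ∀ c ∈ pvCgat, dic2.getD c 0 = (gs.count c : Int) := by
        intro c hc
        rw [hdic2, PySem.Dict.getD_insert]
        by_cases hcc : c = gs[i]
        · subst hcc
          rw [if_pos rfl, hd _ hmem, if_pos rfl]
          ring
        · rw [if_neg hcc, hd c hc, if_neg (fun h => hcc h.symm)]
          ring
      -- second step: balanced, record min 0 0 = 0, shrink
      obtain ⟨f2, rfl⟩ : ∃ f2, f1 = f2 + 1 := ⟨f1 - 1, by omega⟩
      have hcond2 : ((i : Int) + 1 < (gs.length : Int) ∧ (i : Int) + 1 < (gs.length : Int)) := by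
        constructor <;> exact_mod_cast hin
      have hb2 : pvBalanced ((gs.length / 4 : Nat) : Int) dic2 = true := by
        rw [pvBalanced_iff _ dic2 hk2]
        intro c hc
        rw [hd2 c hc]
        exact hall c hc
      simp only [pvALoop, if_pos hcond2, hb2, Bool.not_true, Bool.false_eq_true, if_false]
      have hmin : min (0 : Int) ((i : Int) + 1 - ((i : Int) + 1)) = 0 := by omega
      have hcget2 : PySem.List.pyGetD gs ((i : Int) + 1) 'C' = gs[i + 1] := by
        have : ((i : Int) + 1) = ((i + 1 : Nat) : Int) := by push_cast; ring
        rw [this, PySem.List.pyGetD_natCast]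
        exact List.getD_eq_getElem gs 'C' hin
      rw [hmin, hcget2]
      have hmem2 : gs[i + 1] ∈ pvCgat := hpre _ (List.getElem_mem hin)
      have hcont2 : dic2.contains gs[i + 1] = true :=
        (PySem.Dict.contains_iff_mem_keys dic2 gs[i + 1]).2 (hk2 ▸ hmem2)
      have he : ((i : Int) + 1) + 1 = ((i + 1 : Nat) : Int) + 1 := by push_cast; ring
      have he2 : (i : Int) + 1 = ((i + 1 : Nat) : Int) := by push_cast; ring
      rw [he, he2]
      apply ih f2 (by omega) (i + 1) hin
      · omega
      · rw [PySem.Dict.keys_insert_of_contains dic2 _ hcont2]; exact hk2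
      · intro c hc
        rw [PySem.Dict.getD_insert]
        by_cases hcc : c = gs[i + 1]
        · subst hcc
          rw [if_pos rfl, hd2 _ hmem2, if_pos rfl]
        · rw [if_neg hcc, hd2 c hc, if_neg (fun h => hcc h.symm)]
          ring
    · -- left = i + 1 = length: the loop exits with minLen = 0
      have hcond : ¬ ((i : Int) + 1 < (gs.length : Int) ∧ (i : Int) < (gs.length : Int)) := by
        rintro ⟨hx, -⟩
        have : i + 1 < gs.length := by exact_mod_cast hx
        omega
      simp only [pvALoop, if_neg hcond]


lemma pvPre_iff (gene : String) : Pre_steadyGene gene ↔ ∀ c ∈ gene.toList, c ∈ pvCgat := by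
  unfold Pre_steadyGene pvCgat
  simp [List.all_eq_true]
  exact ⟨fun h c hc => by have := h c hc; tauto, fun h c hc => by have := h c hc; tauto⟩

-- A's value is the least d that is n or the length of a feasible window avoiding the last index
lemma pvA_char (gene : String) (hpre : Pre_steadyGene gene) :
    steadyGene gene = (pvResA gene.toList gene.toList.length 0 0 : Int) := by
  have hp : ∀ c ∈ gene.toList, c ∈ pvCgat := (pvPre_iff gene).1 hpre
  unfold steadyGene
  dsimp only
  set gs := gene.toList with hgs
  have hfd : PySem.Int.floordiv ((gs.length : Int)) 4 = ((gs.length / 4 : Nat) : Int) := by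
    exact_mod_cast PySem.Int.floordiv_natCast gs.length 4
  rw [hfd]
  have hk := pvBuild_keys gs hp
  by_cases hall : ∀ c ∈ pvCgat, (gs.count c : Int) ≤ ((gs.length / 4 : Nat) : Int)
  · have hres : pvResA gs gs.length 0 0 = 0 := by
      unfold pvResA
      rw [Nat.find_eq_zero, pvPA_iff]
      rcases Nat.eq_zero_or_pos gs.length with hn | hn
      · exact Or.inl hn.symm
      · exact Or.inr ⟨0, by omega, le_rfl, le_rfl, (pvFeas_empty_iff gs 0).2 hall⟩
    rw [hres]
    by_cases hn : gs.length = 0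
    · have hcond : ¬ ((0 : Int) < (gs.length : Int) ∧ (0 : Int) < (gs.length : Int)) := by
        simp [hn]
      obtain ⟨f, hf⟩ : ∃ f, 2 * gs.length + 1 = f + 1 := ⟨2 * gs.length, rfl⟩
      rw [hf]
      simp only [pvALoop, if_neg hcond]
      rw [hn]
    · have hpos : 0 < gs.length := Nat.pos_of_ne_zero hn
      have hcond : ((0 : Int) < (gs.length : Int) ∧ (0 : Int) < (gs.length : Int)) :=
        ⟨by exact_mod_cast hpos, by exact_mod_cast hpos⟩
      have hb : pvBalanced ((gs.length / 4 : Nat) : Int)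
          (gs.foldl (fun d ch => d.insert ch (d.getD ch 0 + 1))
            (PySem.Dict.ofList [('C', 0), ('G', 0), ('A', 0), ('T', 0)])) = true := by
        rw [pvBalanced_iff _ _ hk]
        intro c hc
        rw [pvBuild_getD gs c hc]
        exact hall c hc
      have hstep : 2 * gs.length + 1 = (2 * gs.length) + 1 := rfl
      rw [hstep]
      simp only [pvALoop, if_pos hcond, hb, Bool.not_true, Bool.false_eq_true, if_false]
      have hmin : min ((gs.length : Int)) ((0 : Int) - (0 : Int)) = 0 := by
        rw [sub_self]
        exact min_eq_right (by positivity)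
      have hcget : PySem.List.pyGetD gs (0 : Int) 'C' = gs[0] := by
        rw [PySem.List.pyGetD_zero]
        exact List.getD_eq_getElem gs 'C' hpos
      rw [hmin, hcget]
      have hmem : gs[0] ∈ pvCgat := hp _ (List.getElem_mem hpos)
      set dicB : PySem.Dict Char Int := gs.foldl (fun d ch => d.insert ch (d.getD ch 0 + 1))
        (PySem.Dict.ofList [('C', 0), ('G', 0), ('A', 0), ('T', 0)]) with hdicB
      have hcont : dicB.contains gs[0] = true :=
        (PySem.Dict.contains_iff_mem_keys dicB gs[0]).2 (by rw [hdicB, hk]; exact hmem)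
      have hosc := pvOsc gs hp hall (2 * gs.length) 0 hpos
        (dicB.insert gs[0] (dicB.getD gs[0] 0 + 1))
        (by omega)
        (by rw [PySem.Dict.keys_insert_of_contains dicB _ hcont]; exact hk)
        (by
          intro c hc
          rw [PySem.Dict.getD_insert]
          by_cases hcc : c = gs[0]
          · subst hcc
            rw [if_pos rfl, if_pos rfl, pvBuild_getD gs _ hmem]
          · rw [if_neg hcc, if_neg (fun h => hcc h.symm), pvBuild_getD gs c hc]
            ring)
      simpa using hosc
  · have hne : ¬ pvFeas gs 0 0 := fun h => hall ((pvFeas_empty_iff gs 0).1 h)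
    have hmain := pvALoop_main gs hp hne (2 * gs.length + 1) 0 0 gs.length
      (gs.foldl (fun d ch => d.insert ch (d.getD ch 0 + 1))
        (PySem.Dict.ofList [('C', 0), ('G', 0), ('A', 0), ('T', 0)]))
      (le_refl 0) (Nat.zero_le _) (by omega) hk
      (by
        intro c hc
        rw [pvBuild_getD gs c hc]
        unfold pvWindow
        simp)
      (by intro l r _ _ hr; omega)
    simpa using hmain


-- a feasible window can be widened
lemma pvOKB_mono (gs : List Char) {d e : Nat} (hde : d ≤ e) (he : e ≤ gs.length)
    (h : pvOKB gs d = true) : pvOKB gs e = true := by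
  rw [pvOKB_iff] at h ⊢
  obtain ⟨l, h1, h2⟩ := h
  refine ⟨min l (gs.length - e), by omega, ?_⟩
  exact pvFeas_mono gs (by omega) (by omega) (by omega) h2

-- the rolling-window check loop finds a feasible window of width d at or right of l
lemma pvFeasLoop_main (gs : List Char) (hp : ∀ c ∈ gs, c ∈ pvCgat) (d : Nat)
    (total : PySem.Dict Char Int) (ht : ∀ c ∈ pvCgat, total.getD c 0 = (gs.count c : Int)) :
    ∀ (fuel : Nat) (l : Nat) (win : PySem.Dict Char Int),
      l + d ≤ gs.length → gs.length - (l + d) + 1 ≤ fuel →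
      win.keys = pvCgat →
      (∀ c ∈ pvCgat, win.getD c 0 = ((pvWindow gs l (l + d)).count c : Int)) →
      (pvFeasLoop gs (gs.length : Int) ((gs.length / 4 : Nat) : Int) total (d : Int) fuel win (l : Int) = true
        ↔ ∃ l', l ≤ l' ∧ l' + d ≤ gs.length ∧ pvFeas gs l' (l' + d)) := by
  intro fuel
  induction fuel with
  | zero => intro l win h1 h2 _ _; omega
  | succ fuel ih =>
    intro l win h1 h2 hk hw
    have hchk : ((['C', 'G', 'A', 'T'] : List Char).all
        (fun c => total.getD c 0 - win.getD c 0 ≤ ((gs.length / 4 : Nat) : Int))) = true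
        ↔ pvFeas gs l (l + d) := by
      rw [List.all_eq_true, pvFeas_iff]
      constructor
      · intro h c hc
        have hx := h c hc
        rw [decide_eq_true_iff] at hx
        rw [ht c hc, hw c hc] at hx
        exact hx
      · intro h c hc
        rw [decide_eq_true_iff, ht c hc, hw c hc]
        exact h c hc
    by_cases hfw : pvFeas gs l (l + d)
    · simp only [pvFeasLoop, hchk.2 hfw, if_true]
      exact ⟨fun _ => ⟨l, le_rfl, h1, hfw⟩, fun _ => trivial⟩
    · have hc1 : ((['C', 'G', 'A', 'T'] : List Char).all
          (fun c => total.getD c 0 - win.getD c 0 ≤ ((gs.length / 4 : Nat) : Int))) = false := by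
        cases hx : (['C', 'G', 'A', 'T'] : List Char).all
            (fun c => total.getD c 0 - win.getD c 0 ≤ ((gs.length / 4 : Nat) : Int))
        · rfl
        · exact absurd (hchk.1 hx) hfw
      by_cases hend : l + d = gs.length
      · have hge : ((l : Int) + (d : Int) ≥ (gs.length : Int)) := by
          exact_mod_cast le_of_eq hend.symm
        simp only [pvFeasLoop, hc1, Bool.false_eq_true, if_false, if_pos hge]
        constructor
        · intro h; cases h
        · rintro ⟨l', ha, hb, hcf⟩
          have : l' = l := by omega
          subst this
          exact absurd hcf hfw
      · have hlt : l + d < gs.length := by omega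
        have hnge : ¬ ((l : Int) + (d : Int) ≥ (gs.length : Int)) := by
          intro hx
          have : gs.length ≤ l + d := by exact_mod_cast hx
          omega
        simp only [pvFeasLoop, hc1, Bool.false_eq_true, if_false, if_neg hnge]
        have hcget1 : PySem.List.pyGetD gs ((l : Int) + (d : Int)) 'C' = gs[l + d] := by
          have : (l : Int) + (d : Int) = ((l + d : Nat) : Int) := by push_cast; ring
          rw [this, PySem.List.pyGetD_natCast]
          exact List.getD_eq_getElem gs 'C' hlt
        have hln : l < gs.length := by omega
        have hcget2 : PySem.List.pyGetD gs (l : Int) 'C' = gs[l] := by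
          rw [PySem.List.pyGetD_natCast]
          exact List.getD_eq_getElem gs 'C' hln
        rw [hcget1, hcget2]
        have hmem1 : gs[l + d] ∈ pvCgat := hp _ (List.getElem_mem hlt)
        have hmem2 : gs[l] ∈ pvCgat := hp _ (List.getElem_mem hln)
        set win1 := win.insert gs[l + d] (win.getD gs[l + d] 0 + 1) with hwin1
        have hcont1 : win.contains gs[l + d] = true :=
          (PySem.Dict.contains_iff_mem_keys win gs[l + d]).2 (by rw [hk]; exact hmem1)
        have hk1 : win1.keys = pvCgat := by
          rw [hwin1, PySem.Dict.keys_insert_of_contains win _ hcont1]; exact hk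
        have hcont2 : win1.contains gs[l] = true :=
          (PySem.Dict.contains_iff_mem_keys win1 gs[l]).2 (by rw [hk1]; exact hmem2)
        set win2 := win1.insert gs[l] (win1.getD gs[l] 0 - 1) with hwin2
        have hk2 : win2.keys = pvCgat := by
          rw [hwin2, PySem.Dict.keys_insert_of_contains win1 _ hcont2]; exact hk1
        have hw1 : ∀ c ∈ pvCgat, win1.getD c 0
            = win.getD c 0 + (if gs[l + d] = c then 1 else 0) := by
          intro c hc
          rw [hwin1, PySem.Dict.getD_insert]
          by_cases hcc : c = gs[l + d]
          · subst hcc; rw [if_pos rfl, if_pos rfl]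
          · rw [if_neg hcc, if_neg (fun h => hcc h.symm)]; ring
        have hw2 : ∀ c ∈ pvCgat, win2.getD c 0
            = ((pvWindow gs (l + 1) (l + 1 + d)).count c : Int) := by
          intro c hc
          have hpc1 : ((pvWindow gs l (l + d)).count c : Int)
              = pvPC gs (l + d) c - pvPC gs l c := pvWindow_count gs c (by omega)
          have hpc2 : ((pvWindow gs (l + 1) (l + 1 + d)).count c : Int)
              = pvPC gs (l + 1 + d) c - pvPC gs (l + 1) c := pvWindow_count gs c (by omega)
          have hs1 : pvPC gs (l + d + 1) c = pvPC gs (l + d) c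
              + (if gs[l + d] = c then 1 else 0) := pvPC_succ gs c hlt
          have hs2 : pvPC gs (l + 1) c = pvPC gs l c
              + (if gs[l] = c then 1 else 0) := pvPC_succ gs c hln
          have he1 : l + 1 + d = l + d + 1 := by omega
          rw [hwin2, PySem.Dict.getD_insert]
          by_cases hcc : c = gs[l]
          · subst hcc
            rw [if_pos rfl, hw1 _ hc, hw _ hc, hpc2, he1, hs1, hs2, hpc1]
            by_cases h2c : gs[l + d] = gs[l] <;> simp [h2c] <;> omega
          · rw [if_neg hcc, hw1 _ hc, hw _ hc, hpc2, he1, hs1, hs2, hpc1]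
            have hnc : ¬ (gs[l] = c) := fun h => hcc h.symm
            rw [if_neg hnc]
            by_cases h2c : gs[l + d] = c <;> simp [h2c] <;> omega
        have he : (l : Int) + 1 = ((l + 1 : Nat) : Int) := by push_cast; ring
        rw [he]
        rw [ih (l + 1) win2 (by omega) (by omega) hk2 hw2]
        constructor
        · rintro ⟨l', ha, hb, hcf⟩
          exact ⟨l', by omega, hb, hcf⟩
        · rintro ⟨l', ha, hb, hcf⟩
          rcases Nat.eq_or_lt_of_le ha with hq | hq
          · subst hq
            exact absurd hcf hfw
          · exact ⟨l', by omega, hb, hcf⟩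


lemma pvFeasible_iff (gs : List Char) (hp : ∀ c ∈ gs, c ∈ pvCgat)
    (total : PySem.Dict Char Int) (ht : ∀ c ∈ pvCgat, total.getD c 0 = (gs.count c : Int))
    (d : Nat) (hd : d ≤ gs.length) :
    (pvFeasible gs (gs.length : Int) ((gs.length / 4 : Nat) : Int) total (d : Int) = true)
      ↔ pvOKB gs d = true := by
  unfold pvFeasible
  dsimp only
  have hslice : PySem.List.slice gs none (some (d : Int)) = gs.take d := by
    rw [PySem.List.slice_to gs (by positivity)]
    norm_num
  rw [hslice]
  have hpt : ∀ c ∈ gs.take d, c ∈ pvCgat := fun c hc => hp c (List.take_subset d gs hc)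
  have hfuel : (((gs.length : Int) - (d : Int)).toNat + 1) = gs.length - d + 1 := by omega
  rw [hfuel]
  have hmain := pvFeasLoop_main gs hp d total ht (gs.length - d + 1) 0
    (gs.take d |>.foldl (fun w ch => w.insert ch (w.getD ch 0 + 1))
      (PySem.Dict.ofList [('C', 0), ('G', 0), ('A', 0), ('T', 0)]))
    (by omega) (by omega)
    (pvBuild_keys (gs.take d) hpt)
    (by
      intro c hc
      rw [pvBuild_getD (gs.take d) c hc]
      unfold pvWindow
      simp)
  rw [Nat.cast_zero] at hmain
  rw [hmain]
  rw [pvOKB_iff]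
  constructor
  · rintro ⟨l', _, hb, hc⟩; exact ⟨l', hb, hc⟩
  · rintro ⟨l', hb, hc⟩; exact ⟨l', Nat.zero_le _, hb, hc⟩

lemma pvBSearch_main (gs : List Char) (hp : ∀ c ∈ gs, c ∈ pvCgat)
    (total : PySem.Dict Char Int) (ht : ∀ c ∈ pvCgat, total.getD c 0 = (gs.count c : Int)) :
    ∀ (fuel : Nat) (lo hi : Nat), lo ≤ hi → hi ≤ gs.length → hi - lo + 1 ≤ fuel →
      (∀ e, e < lo → ¬ (pvOKB gs e = true)) → pvOKB gs hi = true →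
      pvBSearch gs (gs.length : Int) ((gs.length / 4 : Nat) : Int) total fuel (lo : Int) (hi : Int)
        = (pvLeastB gs : Int) := by
  intro fuel
  induction fuel with
  | zero => intro lo hi h1 h2 h3 _ _; omega
  | succ fuel ih =>
    intro lo hi h1 h2 h3 hlow hok
    rcases Nat.eq_or_lt_of_le h1 with he | hlt
    · subst he
      have hcond : ¬ ((lo : Int) < (lo : Int)) := by omega
      simp only [pvBSearch, if_neg hcond]
      have : pvLeastB gs = lo := by
        unfold pvLeastB
        rw [Nat.find_eq_iff]
        exact ⟨hok, fun j hj => hlow j hj⟩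
      rw [this]
    · have hcond : ((lo : Int) < (hi : Int)) := by exact_mod_cast hlt
      simp only [pvBSearch, if_pos hcond]
      have hmid : PySem.Int.floordiv ((lo : Int) + (hi : Int)) 2 = (((lo + hi) / 2 : Nat) : Int) := by
        have : (lo : Int) + (hi : Int) = ((lo + hi : Nat) : Int) := by push_cast; ring
        rw [this]
        exact_mod_cast PySem.Int.floordiv_natCast (lo + hi) 2
      rw [hmid]
      set midN := (lo + hi) / 2 with hmidN
      have hb1 : lo ≤ midN := by omega
      have hb2 : midN < hi := by omega
      have hfeq := pvFeasible_iff gs hp total ht midN (by omega)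
      by_cases hokm : pvOKB gs midN = true
      · rw [hfeq.2 hokm]
        simp only [if_true]
        exact ih lo midN hb1 (by omega) (by omega) hlow hokm
      · have hff : pvFeasible gs (gs.length : Int) ((gs.length / 4 : Nat) : Int) total
            ((midN : Nat) : Int) = false := by
          cases hx : pvFeasible gs (gs.length : Int) ((gs.length / 4 : Nat) : Int) total
              ((midN : Nat) : Int)
          · rfl
          · exact absurd (hfeq.1 hx) hokm
        rw [hff]
        simp only [Bool.false_eq_true, if_false]
        have he1 : ((midN : Nat) : Int) + 1 = ((midN + 1 : Nat) : Int) := by push_cast; ring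
        rw [he1]
        apply ih (midN + 1) hi (by omega) h2 (by omega) _ hok
        intro e hel
        rcases Nat.lt_or_ge e lo with h5 | h5
        · exact hlow e h5
        · intro hokk
          exact hokm (pvOKB_mono gs (by omega) (by omega) hokk)

lemma pvB_char (gene : String) (hpre : Pre_steadyGene gene) :
    steadyGene_alt gene = (pvLeastB gene.toList : Int) := by
  have hp : ∀ c ∈ gene.toList, c ∈ pvCgat := (pvPre_iff gene).1 hpre
  unfold steadyGene_alt
  dsimp only
  set gs := gene.toList with hgs
  have hfd : PySem.Int.floordiv ((gs.length : Int)) 4 = ((gs.length / 4 : Nat) : Int) := by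
    exact_mod_cast PySem.Int.floordiv_natCast gs.length 4
  rw [hfd]
  have hfuel : (((gs.length : Int) - 0).toNat + 1) = gs.length + 1 := by omega
  rw [hfuel]
  have hokn : pvOKB gs gs.length = true := by
    rw [pvOKB_iff]
    exact ⟨0, by omega, by simpa using pvFeas_whole gs⟩
  have hmain := pvBSearch_main gs hp
    (gs.foldl (fun d ch => d.insert ch (d.getD ch 0 + 1))
      (PySem.Dict.ofList [('C', 0), ('G', 0), ('A', 0), ('T', 0)]))
    (fun c hc => pvBuild_getD gs c hc)
    (gs.length + 1) 0 gs.length (Nat.zero_le _) (le_refl _) (by omega)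
    (by omega) hokn
  simpa using hmain


lemma pvD_iff (gene : String) :
    D_steadyGene gene ↔ ∃ l, 0 < l ∧ l ≤ gene.toList.length ∧
      pvFeas gene.toList l gene.toList.length ∧
      ∀ l' r', l' ≤ r' → r' < gene.toList.length → pvFeas gene.toList l' r' →
        gene.toList.length - l < r' - l' := by
  unfold D_steadyGene
  rw [List.any_eq_true]
  constructor
  · rintro ⟨l, hl, hconj⟩
    rw [List.mem_range] at hl
    rw [Bool.and_eq_true, Bool.and_eq_true] at hconj
    obtain ⟨⟨h0, hf⟩, hall⟩ := hconj
    rw [decide_eq_true_iff] at h0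
    refine ⟨l, h0, by omega, hf, ?_⟩
    intro l' r' hlr hrn hfe
    rw [List.all_eq_true] at hall
    have h1 := hall l' (List.mem_range.2 (by omega))
    rw [List.all_eq_true] at h1
    have h2 := h1 r' (List.mem_range.2 hrn)
    rw [Bool.or_eq_true, Bool.or_eq_true] at h2
    rcases h2 with (hx | hx) | hx
    · rw [Bool.not_eq_true', decide_eq_false_iff_not] at hx
      exact absurd hlr hx
    · rw [Bool.not_eq_true'] at hx
      unfold pvFeas at hfe
      rw [hx] at hfe
      cases hfe
    · rw [decide_eq_true_iff] at hx
      exact hx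
  · rintro ⟨l, h0, hln, hf, hall⟩
    refine ⟨l, List.mem_range.2 (by omega), ?_⟩
    rw [Bool.and_eq_true, Bool.and_eq_true]
    refine ⟨⟨decide_eq_true h0, hf⟩, ?_⟩
    rw [List.all_eq_true]
    intro l' hl'
    rw [List.all_eq_true]
    intro r' hr'
    rw [List.mem_range] at hl' hr'
    rw [Bool.or_eq_true, Bool.or_eq_true]
    by_cases hlr : l' ≤ r'
    · by_cases hfe : pvFeas gene.toList l' r'
      · exact Or.inr (decide_eq_true (hall l' r' hlr hr' hfe))
      · refine Or.inl (Or.inr ?_)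
        rw [Bool.not_eq_true']
        cases hx : pvFeasB gene.toList l' r'
        · rfl
        · exact absurd hx hfe
    · refine Or.inl (Or.inl ?_)
      rw [Bool.not_eq_true', decide_eq_false_iff_not]
      exact hlr

lemma pvLeast_le_res (gs : List Char) : pvLeastB gs ≤ pvResA gs gs.length 0 0 := by
  unfold pvLeastB pvResA
  apply pvFind_le_find
  intro d hd
  rw [pvPA_iff] at hd
  rw [pvOKB_iff]
  rcases hd with rfl | ⟨l, h1, _, _, h4⟩
  · exact ⟨0, by omega, by simpa using pvFeas_whole gs⟩
  · exact ⟨l, by omega, h4⟩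

lemma pvRes_le_least (gene : String) (hnd : ¬ D_steadyGene gene) :
    pvResA gene.toList gene.toList.length 0 0 ≤ pvLeastB gene.toList := by
  obtain ⟨l, hl, hf⟩ : ∃ l, l + pvLeastB gene.toList ≤ gene.toList.length ∧
      pvFeas gene.toList l (l + pvLeastB gene.toList) := by
    have hsp := Nat.find_spec (pvOKB_ex gene.toList)
    rw [pvOKB_iff] at hsp
    exact hsp
  rcases Nat.lt_or_ge (l + pvLeastB gene.toList) gene.toList.length with hlt | hge
  · exact Nat.find_le (by
      rw [pvPA_iff]
      exact Or.inr ⟨l, hlt, Nat.zero_le _, Nat.zero_le _, hf⟩)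
  · have hend : l + pvLeastB gene.toList = gene.toList.length := by omega
    rcases Nat.eq_zero_or_pos l with rfl | hlpos
    · exact Nat.find_le (by
        rw [pvPA_iff]
        exact Or.inl (by omega))
    · rw [pvD_iff] at hnd
      push_neg at hnd
      have hfn : pvFeas gene.toList l gene.toList.length := by rw [← hend]; exact hf
      obtain ⟨l', r', hlr, hrn, hfe, hnl⟩ := hnd l hlpos (by omega) hfn
      calc pvResA gene.toList gene.toList.length 0 0
          ≤ r' - l' := Nat.find_le (by
            rw [pvPA_iff]
            refine Or.inr ⟨l', by omega, Nat.zero_le _, Nat.zero_le _, ?_⟩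
            have h5 : l' + (r' - l') = r' := by omega
            rw [h5]
            exact hfe)
        _ ≤ pvLeastB gene.toList := by omega

lemma pvRes_gt (gene : String) (hd : D_steadyGene gene) :
    pvLeastB gene.toList < pvResA gene.toList gene.toList.length 0 0 := by
  rw [pvD_iff] at hd
  obtain ⟨l, h0, hln, hf, hall⟩ := hd
  have h1 : pvLeastB gene.toList ≤ gene.toList.length - l := by
    apply Nat.find_le
    rw [pvOKB_iff]
    refine ⟨l, by omega, ?_⟩
    have h5 : l + (gene.toList.length - l) = gene.toList.length := by omega
    rw [h5]
    exact hf
  have h2 : gene.toList.length - l < pvResA gene.toList gene.toList.length 0 0 := by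
    unfold pvResA
    rw [Nat.lt_find_iff]
    intro m hm
    rw [pvPA_iff]
    rintro (rfl | ⟨l', hx1, _, _, hx4⟩)
    · omega
    · have := hall l' (l' + m) (by omega) hx1 hx4
      omega
  omega

-- ===== VERDICT =====
theorem steadyGene_spec : Claim_unchanged_steadyGene := by
  intro gene _ hpre
  unfold Spec_steadyGene
  intro hnd
  rw [pvA_char gene hpre, pvB_char gene hpre]
  have h := Nat.le_antisymm (pvRes_le_least gene hnd) (pvLeast_le_res gene.toList)
  exact_mod_cast congrArg (Nat.cast : Nat → Int) h
set_option maxRecDepth 10000 in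
theorem steadyGene_changed : Claim_changed_steadyGene := by
  unfold Claim_changed_steadyGene
  refine ⟨by decide, by decide, by decide, by decide, by decide, by decide⟩
theorem steadyGene_tight : Claim_exact_steadyGene := by
  intro gene _ hpre hd
  rw [pvA_char gene hpre, pvB_char gene hpre]
  have := pvRes_gt gene hd
  intro heq
  have : pvResA gene.toList gene.toList.length 0 0 = pvLeastB gene.toList := by
    exact_mod_cast heq
  omega
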